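-- pv_equiv track=rewrite | github.com/bchwast/AGH-WDI | Kolokwia 16_17/k1_grA_ex2.py | s_max
-- ===== SOURCE A (Python) =====
-- def s_max(tab):
--     MAX = len(tab)
--     suma = 0
--     lrgst = 0
--     lrgst_prev = 1001
--
--     for _ in range(10):
--         for i in range(MAX):
--             if tab[i] > lrgst and tab[i] < lrgst_prev:
--                 lrgst = tab[i]
--             #end if
--         #end for
--         suma += lrgst
--         lrgst_prev = lrgst
--         lrgst = 0
--     #end for
--
--     return suma
-- ===== SOURCE B (Python) =====
-- def s_max(tab):
--     candidates = sorted({v for v in tab if 0 < v < 1001}, reverse=True)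
--     return sum(candidates[:10])
-- ===== Notes on version B (the rewrite author's own statement) =====
-- stated objective: simpler
-- what changed: Replaced A's ten repeated interpreted linear scans (each finding the next-largest value below the previous one) by a single filter-deduplicate-sort pass: sum the first 10 of the distinct in-range values sorted descending (C-level sort/set replacing Python-level loops).
import Mathlib
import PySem

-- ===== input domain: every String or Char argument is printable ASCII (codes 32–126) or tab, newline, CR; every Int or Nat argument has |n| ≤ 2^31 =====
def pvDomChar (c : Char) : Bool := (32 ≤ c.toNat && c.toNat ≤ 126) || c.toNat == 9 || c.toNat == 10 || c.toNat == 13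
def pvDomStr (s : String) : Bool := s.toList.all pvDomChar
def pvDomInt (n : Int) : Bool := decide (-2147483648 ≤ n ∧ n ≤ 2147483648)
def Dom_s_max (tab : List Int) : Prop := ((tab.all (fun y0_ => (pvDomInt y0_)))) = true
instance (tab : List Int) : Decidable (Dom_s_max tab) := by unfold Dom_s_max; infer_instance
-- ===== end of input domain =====

-- B replaces A's ten repeated linear scans by one filter/dedup/sort-descending pass and sums the top 10 (objective: simpler).

-- ===== PORT A =====
def s_max (tab : List Int) : Int :=
  let MAX : Int := (tab.length : Int)
  let st := (PySem.List.pyRange 0 10 1).foldl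
    (fun (st : Int × Int × Int) _ =>
      let lrgst := (PySem.List.pyRange 0 MAX 1).foldl
        (fun l i =>
          if PySem.List.pyGetD tab i 0 > l ∧ PySem.List.pyGetD tab i 0 < st.2.2
          then PySem.List.pyGetD tab i 0 else l) st.2.1
      (st.1 + lrgst, 0, lrgst))
    (0, 0, 1001)
  st.1

-- ===== PORT B =====
def s_max_alt (tab : List Int) : Int :=
  let candidates :=
    PySem.List.sorted (PySem.Set.ofList (tab.filter (fun v => decide (0 < v ∧ v < 1001))))
      (fun x => x) true
  (PySem.List.slice candidates none (some 10)).sum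

-- ===== PRECONDITION & SPEC =====
def Spec_s_max (tab : List Int) (out : Int) : Prop := out = s_max_alt tab
instance (tab : List Int) (out : Int) : Decidable (Spec_s_max tab out) := by unfold Spec_s_max; infer_instance

-- ===== CLAIM (what is proved, stated in full; the proofs are below) =====
def Claim_equal_s_max : Prop := ∀ (tab : List Int), Dom_s_max tab → Spec_s_max tab (s_max tab)

-- ===== LEMMAS AND PROOFS =====

-- A's inner-loop body as a fold step: keep the running maximum of values below p.
def pvStep (p : Int) : Int → Int → Int := fun l v => if v > l ∧ v < p then v else l

-- B's candidate list: the distinct in-range values of tab, sorted descending.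
def pvD (tab : List Int) : List Int :=
  PySem.List.sorted (PySem.Set.ofList (tab.filter (fun v => decide (0 < v ∧ v < 1001))))
    (fun x => x) true

theorem pvD_mem (tab : List Int) (v : Int) :
    v ∈ pvD tab ↔ v ∈ tab ∧ 0 < v ∧ v < 1001 := by
  simp [pvD, PySem.List.mem_sorted, PySem.Set.mem_ofList, List.mem_filter]

theorem pvD_pairwise (tab : List Int) : (pvD tab).Pairwise (fun a b => b < a) := by
  have hle : (pvD tab).Pairwise (fun a b => b ≤ a) := PySem.List.sorted_pairwise_rev _ _
  have hnd : (pvD tab).Nodup :=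
    (PySem.List.sorted_perm _ _ _).nodup_iff.mpr (PySem.Set.nodup_ofList _)
  exact (hle.and hnd).imp (fun h => lt_of_le_of_ne h.1 (Ne.symm h.2))

-- the inner scan is a foldl of pvStep over tab
theorem pv_inner_eq (tab : List Int) (p l0 : Int) :
    (PySem.List.pyRange 0 (tab.length : Int) 1).foldl
      (fun l i => if PySem.List.pyGetD tab i 0 > l ∧ PySem.List.pyGetD tab i 0 < p
                  then PySem.List.pyGetD tab i 0 else l) l0
    = tab.foldl (pvStep p) l0 := by
  exact PySem.List.foldl_pyRange_zero_pyGetD' tab 0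
    (fun l v => if v > l ∧ v < p then v else l) l0

theorem pv_step_eq_max (p : Int) (xs : List Int) (l0 : Int) :
    xs.foldl (pvStep p) l0 = (xs.filter (fun v => decide (v < p))).foldl max l0 := by
  induction xs generalizing l0 with
  | nil => rfl
  | cons x xs ih =>
    have hstep : pvStep p l0 x = if x < p then max l0 x else l0 := by
      simp only [pvStep, max_def]
      split_ifs <;> omega
    simp only [List.foldl_cons, List.filter_cons, hstep]
    by_cases hx : x < p
    · simp [hx, ih]
    · simp [hx, ih]

theorem pv_foldl_max_spec (ys : List Int) (l0 : Int) :
    l0 ≤ ys.foldl max l0 ∧ (ys.foldl max l0 = l0 ∨ ys.foldl max l0 ∈ ys) ∧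
      ∀ v ∈ ys, v ≤ ys.foldl max l0 := by
  induction ys generalizing l0 with
  | nil => simp
  | cons y ys ih =>
    obtain ⟨h1, h2, h3⟩ := ih (max l0 y)
    refine ⟨le_trans (le_max_left _ _) h1, ?_, ?_⟩
    · rcases h2 with h | h
      · rcases max_choice l0 y with hm | hm <;> simp_all
      · simp_all
    · intro v hv
      rcases List.mem_cons.mp hv with rfl | hv
      · exact le_trans (le_max_right _ _) h1
      · exact h3 v hv

-- one round of A computes the head of the not-yet-consumed part of pvD
theorem pv_mstep (tab : List Int) (p : Int) (hp : p ≤ 1001) :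
    tab.foldl (pvStep p) 0 = ((pvD tab).filter (fun v => decide (v < p))).headD 0 := by
  rw [pv_step_eq_max]
  obtain ⟨h1, h2, h3⟩ := pv_foldl_max_spec (tab.filter (fun v => decide (v < p))) 0
  have hH0 : 0 ≤ ((pvD tab).filter (fun v => decide (v < p))).headD 0 := by
    cases hd : (pvD tab).filter (fun v => decide (v < p)) with
    | nil => simp
    | cons h t =>
      have : h ∈ pvD tab := List.mem_of_mem_filter (hd ▸ List.mem_cons_self)
      have := ((pvD_mem tab h).mp this).2.1
      simpa using le_of_lt this
  have hHmem : ((pvD tab).filter (fun v => decide (v < p))).headD 0 = 0 ∨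
      ((pvD tab).filter (fun v => decide (v < p))).headD 0 ∈ tab.filter (fun v => decide (v < p)) := by
    cases hd : (pvD tab).filter (fun v => decide (v < p)) with
    | nil => simp
    | cons h t =>
      right
      have hmem : h ∈ (pvD tab).filter (fun v => decide (v < p)) := hd ▸ List.mem_cons_self
      have hd' := List.mem_of_mem_filter hmem
      have hlt : h < p := by simpa using List.of_mem_filter hmem
      have := (pvD_mem tab h).mp hd'
      simp only [List.headD_cons]
      exact List.mem_filter.mpr ⟨this.1, by simpa using hlt⟩
  have hHub : ∀ v ∈ tab.filter (fun v => decide (v < p)),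
      v ≤ ((pvD tab).filter (fun v => decide (v < p))).headD 0 := by
    intro v hv
    have hvt : v ∈ tab := List.mem_of_mem_filter hv
    have hvp : v < p := by simpa using List.of_mem_filter hv
    by_cases hv0 : 0 < v
    · have hvd : v ∈ pvD tab := (pvD_mem tab v).mpr ⟨hvt, hv0, by omega⟩
      have hvf : v ∈ (pvD tab).filter (fun v => decide (v < p)) :=
        List.mem_filter.mpr ⟨hvd, by simpa using hvp⟩
      cases hd : (pvD tab).filter (fun v => decide (v < p)) with
      | nil => simp [hd] at hvf
      | cons h t =>
        rw [hd] at hvf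
        have hpw : ((pvD tab).filter (fun v => decide (v < p))).Pairwise (fun a b => b < a) :=
          (pvD_pairwise tab).filter _
        rw [hd] at hpw
        rcases List.mem_cons.mp hvf with rfl | hvf
        · simp
        · have := (List.pairwise_cons.mp hpw).1 v hvf
          simpa using le_of_lt this
    · exact le_trans (by omega) hH0
  refine le_antisymm ?_ ?_
  · rcases h2 with h | h
    · omega
    · exact hHub _ h
  · rcases hHmem with h | h
    · omega
    · exact h3 _ h

theorem pv_outer (tab : List Int) (idxs : List Int) (suma p : Int)
    (h0 : 0 ≤ p) (h1 : p ≤ 1001) :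
    (idxs.foldl
      (fun (st : Int × Int × Int) _ =>
        ((st.1 + tab.foldl (pvStep st.2.2) st.2.1, 0,
          tab.foldl (pvStep st.2.2) st.2.1) : Int × Int × Int))
      (suma, 0, p)).1
    = suma + (((pvD tab).filter (fun v => decide (v < p))).take idxs.length).sum := by
  induction idxs generalizing suma p with
  | nil => simp
  | cons i idxs ih =>
    simp only [List.foldl_cons]
    rw [pv_mstep tab p h1]
    cases hd : (pvD tab).filter (fun v => decide (v < p)) with
    | nil =>
      simp only [List.headD_nil]
      rw [ih (suma + 0) 0 le_rfl (by norm_num)]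
      have : (pvD tab).filter (fun v => decide (v < 0)) = [] := by
        rw [List.filter_eq_nil_iff]
        intro v hv
        have := ((pvD_mem tab v).mp hv).2.1
        simp; omega
      simp [this]
    | cons h t =>
      have hmem : h ∈ (pvD tab).filter (fun v => decide (v < p)) := hd ▸ List.mem_cons_self
      have hhd : h ∈ pvD tab := List.mem_of_mem_filter hmem
      have hlt : h < p := by simpa using List.of_mem_filter hmem
      have hh := (pvD_mem tab h).mp hhd
      simp only [List.headD_cons]
      rw [ih (suma + h) h (by omega) (by omega)]
      have hpw : ((pvD tab).filter (fun v => decide (v < p))).Pairwise (fun a b => b < a) :=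
        (pvD_pairwise tab).filter _
      rw [hd] at hpw
      have htlt : ∀ v ∈ t, v < h := (List.pairwise_cons.mp hpw).1
      have hfh : (pvD tab).filter (fun v => decide (v < h)) = t := by
        have e1 : (pvD tab).filter (fun v => decide (v < h))
            = ((pvD tab).filter (fun v => decide (v < p))).filter (fun v => decide (v < h)) := by
          rw [List.filter_filter]
          apply List.filter_congr
          intro v hv
          by_cases hvh : v < h
          · simp [hvh]; omega
          · simp [hvh]
        rw [e1, hd, List.filter_cons]
        simp only [show ¬ (h < h) from lt_irrefl h, decide_false, Bool.false_eq_true, if_false]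
        exact List.filter_eq_self.mpr fun v hv => by simpa using htlt v hv
      rw [hfh]
      simp [List.take_succ_cons]
      omega

-- ===== VERDICT (by name: the statement is the Claim_ definition above) =====
theorem pv_filter_1001 (tab : List Int) :
    (pvD tab).filter (fun v => decide (v < 1001)) = pvD tab := by
  exact List.filter_eq_self.mpr fun v hv => by
    simpa using ((pvD_mem tab v).mp hv).2.2

theorem s_max_spec : Claim_equal_s_max := by
  intro tab _
  unfold Spec_s_max s_max s_max_alt
  simp only [pv_inner_eq]
  rw [pv_outer tab _ 0 1001 (by norm_num) le_rfl]
  rw [pv_filter_1001]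
  have hlen : (PySem.List.pyRange 0 10 1).length = 10 := by decide
  rw [hlen]
  rw [show (10 : Int) = ((10 : Nat) : Int) from rfl, PySem.List.slice_to_natCast]
  simp [pvD]
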